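-- pv_equiv track=rewrite | github.com/codenox57/dalia-wood-app | streamlit_app.py | merge_entities
-- ===== SOURCE A (Python) =====
-- from typing import List, Dict, Tuple
--
-- def merge_entities(entities_list: List[Dict]) -> Dict:
--     merged = {}
--     for entities in entities_list:
--         for entity, quantity in entities.items():
--             if entity in merged and merged[entity] is not None and quantity is not None:
--                 merged[entity] = merged.get(entity, 0) + quantity
--             else:
--                 # If either is None, use the non-None value
--                 merged[entity] = quantity if merged.get(entity) is None else merged[entity]
--     return merged
-- ===== SOURCE B (Python) =====
-- def merge_entities(entities_list):
--     # Pass 1: group quantities per entity in first-seen order.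
--     groups = {}
--     for entities in entities_list:
--         for entity, quantity in entities.items():
--             groups.setdefault(entity, []).append(quantity)
--     # Pass 2: per entity, reduce the non-None quantities (None if there are none).
--     result = {}
--     for entity, qs in groups.items():
--         vals = [q for q in qs if q is not None]
--         if not vals:
--             result[entity] = None
--         else:
--             acc = vals[0]
--             for v in vals[1:]:
--                 acc = acc + v
--             result[entity] = acc
--     return result
-- ===== Notes on version B (the rewrite author's own statement) =====
-- stated objective: alternative
-- what changed: Replaces A's single pass of conditional in-place dict updates with a two-phase algorithm: first group all quantities per entity into lists (first-seen order), then reduce each group's non-None values (None if the group has none).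
import Mathlib
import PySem

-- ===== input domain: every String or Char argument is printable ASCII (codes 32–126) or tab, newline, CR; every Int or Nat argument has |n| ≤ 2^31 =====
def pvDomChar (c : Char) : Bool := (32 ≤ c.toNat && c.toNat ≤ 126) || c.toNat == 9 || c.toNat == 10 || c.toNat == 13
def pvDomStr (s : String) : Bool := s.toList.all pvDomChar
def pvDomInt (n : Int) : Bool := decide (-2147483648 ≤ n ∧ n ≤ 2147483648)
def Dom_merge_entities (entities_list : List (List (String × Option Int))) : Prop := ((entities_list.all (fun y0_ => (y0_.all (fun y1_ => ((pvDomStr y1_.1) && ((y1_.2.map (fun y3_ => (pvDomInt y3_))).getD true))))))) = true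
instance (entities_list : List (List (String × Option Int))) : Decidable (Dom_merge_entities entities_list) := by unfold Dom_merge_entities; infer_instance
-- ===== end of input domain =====

-- B replaces A's single pass of conditional dict updates with a two-phase group-then-reduce
-- algorithm of similar cost (objective: alternative).


-- ===== PORT A =====
-- one body step of A's inner loop: the if/else on (entity, quantity)
def mergeStepA (m : PySem.Dict String (Option Int)) (p : String × Option Int) :
    PySem.Dict String (Option Int) :=
  if m.contains p.1 ∧ (m.getD p.1 none).isSome ∧ p.2.isSome then
    -- merged[entity] = merged.get(entity, 0) + quantity  (both sides are non-None ints here)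
    m.insert p.1 (some ((m.getD p.1 (some 0)).getD 0 + p.2.getD 0))
  else
    -- merged[entity] = quantity if merged.get(entity) is None else merged[entity]
    m.insert p.1 (if (m.getD p.1 none) = none then p.2 else m.getD p.1 none)

def merge_entities (entities_list : List (List (String × Option Int))) : List (String × Option Int) :=
  (entities_list.foldl (fun m entities => entities.foldl mergeStepA m) PySem.Dict.empty).items

-- ===== PORT B =====
-- reduce of one group: None if no non-None value, else left-fold of + from the first value
def combineB (qs : List (Option Int)) : Option Int :=
  match qs.filterMap id with
  | [] => none
  | v :: rest => some (rest.foldl (· + ·) v)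

def merge_entities_alt (entities_list : List (List (String × Option Int))) : List (String × Option Int) :=
  -- pass 1: groups.setdefault(entity, []).append(quantity)
  let groups : PySem.Dict String (List (Option Int)) :=
    entities_list.foldl
      (fun g entities => entities.foldl (fun g p => g.modify p.1 [] (· ++ [p.2])) g)
      PySem.Dict.empty
  -- pass 2: result[entity] = reduce of the non-None quantities
  (groups.items.foldl (fun r p => r.insert p.1 (combineB p.2)) PySem.Dict.empty).items

-- ===== PRECONDITION & SPEC =====
def Spec_merge_entities (entities_list : List (List (String × Option Int))) (out : List (String × Option Int)) : Prop := out = merge_entities_alt entities_list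
instance (entities_list : List (List (String × Option Int))) (out : List (String × Option Int)) : Decidable (Spec_merge_entities entities_list out) := by unfold Spec_merge_entities; infer_instance

-- ===== CLAIM (what is proved, stated in full; the proofs are below) =====
def Claim_equal_merge_entities : Prop := ∀ (entities_list : List (List (String × Option Int))), Dom_merge_entities entities_list → Spec_merge_entities entities_list (merge_entities entities_list)

-- ===== LEMMAS AND PROOFS =====

-- A's per-key state transition: the new value at key p.1 as a function of the old value and p.2
def f2 (s q : Option Int) : Option Int :=
  match s, q with
  | some a, some b => some (a + b)
  | none, _ => q
  | some a, none => some a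

theorem mergeStepA_eq_insert (m : PySem.Dict String (Option Int)) (p : String × Option Int) :
    mergeStepA m p = m.insert p.1 (f2 (m.getD p.1 none) p.2) := by
  unfold mergeStepA f2
  by_cases hc : m.contains p.1
  · cases hs : m.getD p.1 none with
    | none => cases p.2 <;> simp [hc]
    | some a =>
      cases hq : p.2 with
      | none => simp [hc]
      | some b =>
        simp only [hc, hs, Option.isSome_some, and_true, if_true, reduceCtorEq, if_false]
        have : m.getD p.1 (some 0) = some a := by
          rw [PySem.Dict.getD_eq_get?_getD] at hs ⊢
          cases h : m.get? p.1 with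
          | none => simp [h] at hs
          | some v => simp [h] at hs ⊢; exact hs
        simp [this]
  · have hs : m.getD p.1 none = none := PySem.Dict.getD_of_not_contains _ _ (by simpa using hc)
    cases p.2 <;> simp [hc, hs]

theorem foldl_f2_some (qs : List (Option Int)) (a : Int) :
    qs.foldl f2 (some a) = some ((qs.filterMap id).foldl (· + ·) a) := by
  induction qs generalizing a with
  | nil => rfl
  | cons q t ih => cases q <;> simp [f2, ih]

theorem foldl_f2_none (qs : List (Option Int)) : qs.foldl f2 none = combineB qs := by
  induction qs with
  | nil => rfl
  | cons q t ih =>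
    cases q with
    | none => simpa [f2, combineB] using ih
    | some b => simp [f2, combineB, foldl_f2_some]

-- A's fold, read at one key, is a fold of f2 over that key's quantity stream
theorem getD_foldl_stepA (L : List (String × Option Int)) (m : PySem.Dict String (Option Int))
    (k : String) :
    (L.foldl mergeStepA m).getD k none
      = ((L.filter (fun p => p.1 == k)).map (·.2)).foldl f2 (m.getD k none) := by
  induction L generalizing m with
  | nil => rfl
  | cons p t ih =>
    simp only [List.foldl_cons, ih, mergeStepA_eq_insert, List.filter_cons]
    by_cases h : p.1 = k
    · simp [h]
    · simp [h, PySem.Dict.getD_insert, Ne.symm h]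

theorem keys_foldl_stepA (L : List (String × Option Int)) (m : PySem.Dict String (Option Int)) :
    (L.foldl mergeStepA m).keys = PySem.Set.update m.keys (L.map (·.1)) := by
  have hf : mergeStepA = fun d p => d.insert p.1 (f2 (d.getD p.1 none) p.2) :=
    funext fun d => funext fun p => mergeStepA_eq_insert d p
  rw [hf, PySem.Dict.keys_foldl_insert_key]

theorem nodup_keys_foldl_stepA (L : List (String × Option Int)) :
    (L.foldl mergeStepA PySem.Dict.empty).keys.Nodup := by
  have hf : mergeStepA = fun d p => d.insert p.1 (f2 (d.getD p.1 none) p.2) :=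
    funext fun d => funext fun p => mergeStepA_eq_insert d p
  rw [hf]
  exact PySem.Dict.nodup_keys_foldl_insert_key _ _ _ _ PySem.Dict.nodup_keys_empty

-- ===== VERDICT (by name: the statement is the Claim_ definition above) =====
theorem merge_entities_spec : Claim_equal_merge_entities := by
  intro el _
  unfold Spec_merge_entities merge_entities merge_entities_alt
  rw [← List.foldl_flatten, ← List.foldl_flatten]
  set L := el.flatten with hL
  set mA := L.foldl mergeStepA PySem.Dict.empty with hmA
  set g := L.foldl (fun g p => g.modify p.1 [] (· ++ [p.2])) PySem.Dict.empty with hg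
  have hgnd : g.keys.Nodup :=
    PySem.Dict.nodup_keys_foldl_modify_key _ _ _ _ _ PySem.Dict.nodup_keys_empty
  have hAnd : mA.keys.Nodup := nodup_keys_foldl_stepA L
  have hkeys : mA.keys = g.keys := by
    rw [hmA, hg, keys_foldl_stepA, PySem.Dict.keys_foldl_modify_key]
    rfl
  have hval : ∀ k, mA.getD k none = combineB (g.getD k []) := by
    intro k
    rw [hmA, hg, getD_foldl_stepA, PySem.Dict.getD_foldl_modify_append, ← foldl_f2_none]
    simp [PySem.Dict.getD_empty]
  -- B's second pass appends fresh distinct keys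
  have hfresh : (g.items.foldl (fun r p => r.insert p.1 (combineB p.2)) PySem.Dict.empty).items
      = PySem.Dict.empty.items ++ g.items.map (fun p => (p.1, combineB p.2)) := by
    apply PySem.Dict.items_foldl_insert_fresh
    · intro a _; exact PySem.Dict.contains_empty _
    · exact hgnd
  rw [hfresh, show (PySem.Dict.empty : PySem.Dict String (Option Int)).items = [] from rfl]
  rw [PySem.Dict.items_eq_map_keys mA hAnd none,
      PySem.Dict.items_eq_map_keys g hgnd []]
  simp only [List.nil_append, List.map_map, hkeys]
  apply List.map_congr_left
  intro k _
  simp [Function.comp, hval k]
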